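-- pv_equiv track=rewrite | github.com/braulioti/poo_com_python | Seção 3 - POO com Python/numero_perfeito.py | numero_perfeito
-- ===== SOURCE A (Python) =====
-- def numero_perfeito(num):
--     i = num
--     soma = 0
--     resposta = ''
--     while (i > 1):
--         i = i - 1
--         if (num % i == 0):
--             soma = soma + i
--             if (resposta == ''):
--                 resposta = str(i)
--             else:
--                 resposta = resposta + ' + ' + str(i)
--             resposta = resposta.format(i)
--
--         if (i == 1):
--             resposta = resposta + ' = ' + str(soma)
--             if (soma == num):
--                 resposta = resposta + ' (perfeito)'
--             else:
--                 resposta = resposta + ' (imperfeito)'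
--     return resposta
-- ===== SOURCE B (Python) =====
-- def numero_perfeito(num):
--     if num <= 1:
--         return ''
--     small = []   # divisors d with d*d <= num, ascending
--     large = []   # their cofactors num//d (> sqrt(num)), descending, excluding num itself
--     d = 1
--     while d * d <= num:
--         if num % d == 0:
--             small.append(d)
--             q = num // d
--             if q != d and q != num:
--                 large.append(q)
--         d += 1
--     divs = large + small[::-1]   # all proper divisors, descending
--     soma = sum(divs)
--     rotulo = ' (perfeito)' if soma == num else ' (imperfeito)'
--     return ' + '.join(str(x) for x in divs) + ' = ' + str(soma) + rotulo
-- ===== Notes on version B (the rewrite author's own statement) =====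
-- stated objective: faster
-- what changed: B enumerates the proper divisors by trial division up to sqrt(num), pairing each small divisor with its cofactor, then concatenates the two runs into the same descending list and builds the string once with ' + '.join, instead of A's single loop over every i from num-1 down to 1 that accumulates the string and sum as it goes.
import Mathlib
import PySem

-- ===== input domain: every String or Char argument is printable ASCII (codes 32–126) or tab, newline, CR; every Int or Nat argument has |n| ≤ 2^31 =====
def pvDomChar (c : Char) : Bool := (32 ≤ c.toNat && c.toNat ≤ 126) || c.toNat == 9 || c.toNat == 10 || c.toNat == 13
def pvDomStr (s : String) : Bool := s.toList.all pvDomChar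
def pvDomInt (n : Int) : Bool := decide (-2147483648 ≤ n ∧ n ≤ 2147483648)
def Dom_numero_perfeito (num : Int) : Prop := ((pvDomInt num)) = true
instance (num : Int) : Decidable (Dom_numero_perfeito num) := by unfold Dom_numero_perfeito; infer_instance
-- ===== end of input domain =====

-- B finds the proper divisors by trial division up to √num (collecting each divisor with its
-- cofactor) instead of A's scan over every i < num — asymptotically faster, same exact string.

-- ===== PORT A =====
-- the while loop of A: state (i, soma, resposta); `resposta.format(i)` is the identity here,
-- since resposta only ever contains digits, ' ', '+' and '-' (never '{' or '}')
def numero_perfeito_loop (num i soma : Int) (resposta : String) : String :=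
  if h : 1 < i then
    let i' := i - 1
    let soma' := if PySem.Int.mod num i' = 0 then soma + i' else soma
    let resposta' := if PySem.Int.mod num i' = 0 then
        (if resposta == "" then PySem.Int.toStr i' else resposta ++ " + " ++ PySem.Int.toStr i')
      else resposta
    let resposta'' := if i' = 1 then
        (resposta' ++ " = " ++ PySem.Int.toStr soma') ++
          (if soma' = num then " (perfeito)" else " (imperfeito)")
      else resposta'
    numero_perfeito_loop num i' soma' resposta''
  else resposta
termination_by i.toNat
decreasing_by omega

def numero_perfeito (num : Int) : String :=
  numero_perfeito_loop num num 0 ""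

-- ===== PORT B =====
-- Source B's while loop: d counts up while d*d ≤ num, collecting small divisors (ascending) and
-- their cofactors num // d (descending, excluding num itself)
def numero_perfeito_alt_loop (num d : Int) (small large : List Int) : List Int × List Int :=
  if h : d * d ≤ num then
    if PySem.Int.mod num d = 0 then
      let q := PySem.Int.floordiv num d
      numero_perfeito_alt_loop num (d + 1) (small ++ [d])
        (if q ≠ d ∧ q ≠ num then large ++ [q] else large)
    else numero_perfeito_alt_loop num (d + 1) small large
  else (small, large)
termination_by (num + 1 - d).toNat
decreasing_by
  all_goals
    first
      | (by_cases hd : 1 ≤ d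
         · have : d ≤ d * d := le_mul_of_one_le_left (by omega) hd
           omega
         · have hnum : (0:Int) ≤ num := le_trans (mul_self_nonneg d) h
           omega)

def numero_perfeito_alt (num : Int) : String :=
  if num ≤ 1 then "" else
    let p := numero_perfeito_alt_loop num 1 [] []
    let divs := p.2 ++ p.1.reverse
    let soma := divs.sum
    let rotulo := if soma = num then " (perfeito)" else " (imperfeito)"
    PySem.Str.join " + " (divs.map PySem.Int.toStr) ++ " = " ++ PySem.Int.toStr soma ++ rotulo

-- ===== PRECONDITION & SPEC =====
def Spec_numero_perfeito (num : Int) (out : String) : Prop := out = numero_perfeito_alt num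
instance (num : Int) (out : String) : Decidable (Spec_numero_perfeito num out) := by unfold Spec_numero_perfeito; infer_instance

-- ===== CLAIM (what is proved, stated in full; the proofs are below) =====
def Claim_equal_numero_perfeito : Prop := ∀ (num : Int), Dom_numero_perfeito num → Spec_numero_perfeito num (numero_perfeito num)

-- ===== LEMMAS AND PROOFS =====

-- the proper divisors of num in [1, j], listed descending
def descDivs (num j : Int) : List Int :=
  if h : 1 ≤ j then (if num % j = 0 then [j] else []) ++ descDivs num (j - 1) else []
termination_by j.toNat
decreasing_by omega

-- the small divisors d (1 ≤ d, d*d ≤ num), ascending, as Source B's loop collects them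
def sDivs (num d : Int) : List Int :=
  if h : d * d ≤ num then (if num % d = 0 then [d] else []) ++ sDivs num (d + 1) else []
termination_by (num + 1 - d).toNat
decreasing_by
  by_cases hd : 1 ≤ d
  · have : d ≤ d * d := le_mul_of_one_le_left (by omega) hd
    omega
  · have hnum : (0:Int) ≤ num := le_trans (mul_self_nonneg d) h
    omega

-- the large cofactors num / d, descending, as Source B's loop collects them
def lDivs (num d : Int) : List Int :=
  if h : d * d ≤ num then
    (if num % d = 0 ∧ num / d ≠ d ∧ num / d ≠ num then [num / d] else []) ++ lDivs num (d + 1)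
  else []
termination_by (num + 1 - d).toNat
decreasing_by
  by_cases hd : 1 ≤ d
  · have : d ≤ d * d := le_mul_of_one_le_left (by omega) hd
    omega
  · have hnum : (0:Int) ≤ num := le_trans (mul_self_nonneg d) h
    omega

-- A's string-accumulation step, iterated over a list of divisors
def combineDivs (r : String) : List Int → String
  | [] => r
  | d :: ds => combineDivs (if r == "" then PySem.Int.toStr d else r ++ " + " ++ PySem.Int.toStr d) ds

def finalize (num soma : Int) (r : String) : String :=
  (r ++ " = " ++ PySem.Int.toStr soma) ++ (if soma = num then " (perfeito)" else " (imperfeito)")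

lemma descDivs_one (num : Int) : descDivs num 1 = [1] := by
  rw [descDivs]
  simp [descDivs]

lemma descDivs_step (num j : Int) (h : 1 ≤ j) :
    descDivs num j = (if num % j = 0 then [j] else []) ++ descDivs num (j - 1) := by
  rw [descDivs]; simp [h]

-- A's loop computes: append every divisor in [1, i-1] (descending), then finalize
lemma aLoop_eq (num i : Int) (h2 : 2 ≤ i) : ∀ (soma : Int) (r : String),
    numero_perfeito_loop num i soma r =
      finalize num (soma + (descDivs num (i - 1)).sum) (combineDivs r (descDivs num (i - 1))) := by
  induction i, h2 using Int.le_induction with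
  | base =>
      intro soma r
      rw [numero_perfeito_loop]
      simp only [show (1:Int) < 2 from by omega, dif_pos]
      rw [numero_perfeito_loop]
      simp [descDivs_one, finalize, combineDivs]
  | succ i hi ih =>
      intro soma r
      rw [numero_perfeito_loop]
      have h1 : (1:Int) < i + 1 := by omega
      have h2 : i + 1 - 1 = i := by omega
      have hne : ¬ (i = 1) := by omega
      simp only [dif_pos h1, h2, hne, if_false]
      rw [ih]
      have hmod : PySem.Int.mod num i = num % i := PySem.Int.mod_eq_emod_of_pos (by omega)
      rw [descDivs_step num i (by omega)]
      by_cases hd : num % i = 0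
      · simp [hmod, hd, combineDivs, finalize]
        ring_nf
      · simp [hmod, hd]

lemma numero_perfeito_eq (num : Int) (h : 2 ≤ num) :
    numero_perfeito num =
      finalize num (descDivs num (num - 1)).sum (combineDivs "" (descDivs num (num - 1))) := by
  unfold numero_perfeito
  rw [aLoop_eq num num h 0 ""]
  simp

-- unfolding equations for the divisor enumerations
lemma sDivs_step (num d : Int) (h : d * d ≤ num) :
    sDivs num d = (if num % d = 0 then [d] else []) ++ sDivs num (d + 1) := by
  rw [sDivs, dif_pos h]

lemma sDivs_stop (num d : Int) (h : ¬ d * d ≤ num) : sDivs num d = [] := by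
  rw [sDivs, dif_neg h]

lemma lDivs_step (num d : Int) (h : d * d ≤ num) :
    lDivs num d = (if num % d = 0 ∧ num / d ≠ d ∧ num / d ≠ num then [num / d] else [])
      ++ lDivs num (d + 1) := by
  rw [lDivs, dif_pos h]

lemma lDivs_stop (num d : Int) (h : ¬ d * d ≤ num) : lDivs num d = [] := by
  rw [lDivs, dif_neg h]

-- Source B's loop only ever appends to its accumulators
lemma bLoop_eq (num : Int) : ∀ (d : Int) (s l : List Int), 1 ≤ d →
    numero_perfeito_alt_loop num d s l = (s ++ sDivs num d, l ++ lDivs num d) := by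
  intro d s l
  induction d, s, l using numero_perfeito_alt_loop.induct num with
  | case1 e s' l' h hmod q ih =>
      intro hd
      have hmod' : num % e = 0 := by
        rwa [PySem.Int.mod_eq_emod_of_pos (by omega)] at hmod
      have hq : q = num / e := by
        show PySem.Int.floordiv num e = num / e
        exact PySem.Int.floordiv_eq_ediv_of_pos (by omega)
      rw [numero_perfeito_alt_loop]
      rw [dif_pos h, if_pos hmod]
      show numero_perfeito_alt_loop num (e + 1) (s' ++ [e])
          (if q ≠ e ∧ q ≠ num then l' ++ [q] else l') = _
      by_cases hc : q ≠ e ∧ q ≠ num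
      · rw [if_pos hc]
        rw [(by rw [dif_pos hc] : (if h : q ≠ e ∧ q ≠ num then l' ++ [q] else l') = l' ++ [q])] at ih
        rw [ih (by omega)]
        rw [sDivs_step num e h, lDivs_step num e h]
        rw [if_pos hmod', if_pos ⟨hmod', hq ▸ hc⟩, hq]
        simp
      · rw [if_neg hc]
        rw [(by rw [dif_neg hc] : (if h : q ≠ e ∧ q ≠ num then l' ++ [q] else l') = l')] at ih
        rw [ih (by omega)]
        rw [sDivs_step num e h, lDivs_step num e h]
        rw [if_pos hmod', if_neg (show ¬(num % e = 0 ∧ num / e ≠ e ∧ num / e ≠ num) by rw [← hq]; tauto)]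
        simp
  | case2 e s' l' h hmod ih =>
      intro hd
      have hmod' : ¬ num % e = 0 := by
        rwa [PySem.Int.mod_eq_emod_of_pos (by omega)] at hmod
      rw [numero_perfeito_alt_loop]
      rw [dif_pos h, if_neg hmod]
      rw [ih (by omega)]
      rw [sDivs_step num e h, lDivs_step num e h]
      rw [if_neg hmod', if_neg (by tauto)]
      simp
  | case3 e s' l' h =>
      intro hd
      rw [numero_perfeito_alt_loop, dif_neg h, sDivs_stop num e h, lDivs_stop num e h]
      simp

-- membership in descDivs
lemma mem_descDivs (num : Int) : ∀ (j x : Int), x ∈ descDivs num j ↔ 1 ≤ x ∧ x ≤ j ∧ num % x = 0 := by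
  intro j
  induction j using descDivs.induct with
  | case1 j h ih =>
      intro x
      rw [descDivs_step num j h]
      simp only [List.mem_append, ih]
      by_cases hj : num % j = 0
      · rw [if_pos hj]
        simp only [List.mem_singleton]
        constructor
        · rintro (rfl | ⟨h1, h2, h3⟩)
          · exact ⟨h, le_refl _, hj⟩
          · exact ⟨h1, by omega, h3⟩
        · rintro ⟨h1, h2, h3⟩
          by_cases hx : x = j
          · exact Or.inl hx
          · exact Or.inr ⟨h1, by omega, h3⟩
      · rw [if_neg hj]
        simp only [List.not_mem_nil, false_or]
        constructor
        · rintro ⟨h1, h2, h3⟩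
          exact ⟨h1, by omega, h3⟩
        · rintro ⟨h1, h2, h3⟩
          by_cases hx : x = j
          · exact absurd (hx ▸ h3) hj
          · exact ⟨h1, by omega, h3⟩
  | case2 j h =>
      intro x
      rw [descDivs, dif_neg h]
      simp only [List.not_mem_nil, false_iff]
      rintro ⟨h1, h2, _⟩
      omega

-- membership in sDivs
lemma mem_sDivs (num : Int) : ∀ (d x : Int), 1 ≤ d →
    (x ∈ sDivs num d ↔ d ≤ x ∧ x * x ≤ num ∧ num % x = 0) := by
  intro d
  induction d using sDivs.induct num with
  | case1 d h ih =>
      intro x hd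
      rw [sDivs_step num d h]
      simp only [List.mem_append]
      rw [ih x (by omega)]
      by_cases hj : num % d = 0
      · rw [if_pos hj]
        simp only [List.mem_singleton]
        constructor
        · rintro (rfl | ⟨h1, h2, h3⟩)
          · exact ⟨le_refl _, h, hj⟩
          · exact ⟨by omega, h2, h3⟩
        · rintro ⟨h1, h2, h3⟩
          by_cases hx : x = d
          · exact Or.inl hx
          · exact Or.inr ⟨by omega, h2, h3⟩
      · rw [if_neg hj]
        simp only [List.not_mem_nil, false_or]
        constructor
        · rintro ⟨h1, h2, h3⟩
          exact ⟨by omega, h2, h3⟩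
        · rintro ⟨h1, h2, h3⟩
          by_cases hx : x = d
          · exact absurd (hx ▸ h3) hj
          · exact ⟨by omega, h2, h3⟩
  | case2 d h =>
      intro x hd
      rw [sDivs_stop num d h]
      simp only [List.not_mem_nil, false_iff]
      rintro ⟨h1, h2, _⟩
      have : d * d ≤ x * x := by nlinarith
      omega

-- membership in lDivs
lemma mem_lDivs (num : Int) : ∀ (d x : Int), 1 ≤ d →
    (x ∈ lDivs num d ↔ ∃ e, d ≤ e ∧ e * e ≤ num ∧ num % e = 0 ∧ x = num / e ∧ x ≠ e ∧ x ≠ num) := by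
  intro d
  induction d using lDivs.induct num with
  | case1 d h ih =>
      intro x hd
      rw [lDivs_step num d h]
      simp only [List.mem_append]
      rw [ih x (by omega)]
      constructor
      · rintro (hx | ⟨e, he1, he2, he3, he4, he5, he6⟩)
        · by_cases hc : num % d = 0 ∧ num / d ≠ d ∧ num / d ≠ num
          · rw [if_pos hc] at hx
            simp only [List.mem_singleton] at hx
            exact ⟨d, le_refl _, h, hc.1, hx, hx ▸ hc.2.1, hx ▸ hc.2.2⟩
          · rw [if_neg hc] at hx
            simp at hx
        · exact ⟨e, by omega, he2, he3, he4, he5, he6⟩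
      · rintro ⟨e, he1, he2, he3, he4, he5, he6⟩
        by_cases hx : e = d
        · subst hx
          left
          rw [if_pos ⟨he3, he4 ▸ he5, he4 ▸ he6⟩]
          simp [he4]
        · exact Or.inr ⟨e, by omega, he2, he3, he4, he5, he6⟩
  | case2 d h =>
      intro x hd
      rw [lDivs_stop num d h]
      simp only [List.not_mem_nil, false_iff]
      rintro ⟨e, he1, he2, _⟩
      have : d * d ≤ e * e := by nlinarith
      omega

-- closed form of lDivs membership, for num ≥ 2
lemma mem_lDivs_one (num x : Int) (h2 : 2 ≤ num) :
    x ∈ lDivs num 1 ↔ 1 ≤ x ∧ x < num ∧ num < x * x ∧ num % x = 0 := by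
  rw [mem_lDivs num 1 x (le_refl _)]
  constructor
  · rintro ⟨e, he1, he2, he3, rfl, he5, he6⟩
    have hdvd : e ∣ num := Int.dvd_of_emod_eq_zero he3
    have hmul : num / e * e = num := Int.ediv_mul_cancel hdvd
    have hxpos : 1 ≤ num / e := by nlinarith
    have hex : e < num / e := by
      rcases lt_trichotomy e (num / e) with h | h | h
      · exact h
      · exact absurd h.symm he5
      · nlinarith
    refine ⟨hxpos, ?_, by nlinarith, ?_⟩
    · have : num / e ≤ num := by nlinarith
      rcases lt_or_eq_of_le this with h | h
      · exact h
      · exact absurd h he6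
    · exact Int.emod_eq_zero_of_dvd ⟨e, by linarith [hmul]⟩
  · rintro ⟨h1, h3, h4, h5⟩
    have hdvd : x ∣ num := Int.dvd_of_emod_eq_zero h5
    have hmul : num / x * x = num := Int.ediv_mul_cancel hdvd
    have hepos : 1 ≤ num / x := by nlinarith
    have hex : num / x < x := by nlinarith
    refine ⟨num / x, hepos, by nlinarith,
      Int.emod_eq_zero_of_dvd ⟨x, by linarith [hmul]⟩, ?_, by omega, by omega⟩
    obtain ⟨e, he, hmul'⟩ : ∃ e, e = num / x ∧ e * x = num := ⟨num / x, rfl, hmul⟩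
    rw [← he, ← hmul', Int.mul_ediv_cancel_left x (by omega)]

lemma pairwise_descDivs (num : Int) : ∀ j, (descDivs num j).Pairwise (· > ·) := by
  intro j
  induction j using descDivs.induct with
  | case1 j h ih =>
      rw [descDivs_step num j h]
      rw [List.pairwise_append]
      refine ⟨?_, ih, ?_⟩
      · by_cases hj : num % j = 0 <;> simp [hj]
      · intro a ha b hb
        have hb' := (mem_descDivs num (j - 1) b).mp hb
        by_cases hj : num % j = 0
        · rw [if_pos hj] at ha
          simp only [List.mem_singleton] at ha
          subst ha
          show b < a
          omega
        · rw [if_neg hj] at ha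
          simp at ha
  | case2 j h =>
      rw [descDivs, dif_neg h]
      exact List.Pairwise.nil

lemma pairwise_sDivs (num : Int) : ∀ d, 1 ≤ d → (sDivs num d).Pairwise (· < ·) := by
  intro d
  induction d using sDivs.induct num with
  | case1 d h ih =>
      intro hd
      rw [sDivs_step num d h]
      rw [List.pairwise_append]
      refine ⟨?_, ih (by omega), ?_⟩
      · by_cases hj : num % d = 0 <;> simp [hj]
      · intro a ha b hb
        have hb' := (mem_sDivs num (d + 1) b (by omega)).mp hb
        by_cases hj : num % d = 0
        · rw [if_pos hj] at ha
          simp only [List.mem_singleton] at ha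
          subst ha
          omega
        · rw [if_neg hj] at ha
          simp at ha
  | case2 d h =>
      intro hd
      rw [sDivs_stop num d h]
      exact List.Pairwise.nil

lemma pairwise_lDivs (num : Int) : ∀ d, 1 ≤ d → (lDivs num d).Pairwise (· > ·) := by
  intro d
  induction d using lDivs.induct num with
  | case1 d h ih =>
      intro hd
      rw [lDivs_step num d h]
      rw [List.pairwise_append]
      refine ⟨?_, ih (by omega), ?_⟩
      · by_cases hc : num % d = 0 ∧ num / d ≠ d ∧ num / d ≠ num
        · rw [if_pos hc]; simp
        · rw [if_neg hc]; simp
      · intro a ha b hb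
        by_cases hc : num % d = 0 ∧ num / d ≠ d ∧ num / d ≠ num
        swap
        · rw [if_neg hc] at ha
          simp at ha
        rw [if_pos hc] at ha
        simp only [List.mem_singleton] at ha
        subst ha
        obtain ⟨e, he1, he2, he3, rfl, he5, he6⟩ :=
          (mem_lDivs num (d + 1) b (by omega)).mp hb
        have hdvd1 : d ∣ num := Int.dvd_of_emod_eq_zero hc.1
        have hdvd2 : e ∣ num := Int.dvd_of_emod_eq_zero he3
        have hm1 : num / d * d = num := Int.ediv_mul_cancel hdvd1
        have hm2 : num / e * e = num := Int.ediv_mul_cancel hdvd2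
        have hnum : 2 ≤ num := by nlinarith
        have hq2 : 1 ≤ num / e := by nlinarith
        have hq1 : 1 ≤ num / d := by nlinarith
        show num / e < num / d
        by_contra hle
        have hle' : num / d ≤ num / e := by omega
        nlinarith
  | case2 d h =>
      intro hd
      rw [lDivs_stop num d h]
      exact List.Pairwise.nil

-- the two divisor enumerations agree
lemma divs_eq (num : Int) (h2 : 2 ≤ num) :
    lDivs num 1 ++ (sDivs num 1).reverse = descDivs num (num - 1) := by
  have hnodup1 : (lDivs num 1 ++ (sDivs num 1).reverse).Pairwise (· > ·) := by
    rw [List.pairwise_append]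
    refine ⟨pairwise_lDivs num 1 (le_refl _), ?_, ?_⟩
    · rw [List.pairwise_reverse]
      exact pairwise_sDivs num 1 (le_refl _)
    · intro a ha b hb
      rw [List.mem_reverse] at hb
      obtain ⟨ha1, _, ha3, _⟩ := (mem_lDivs_one num a h2).mp ha
      obtain ⟨hb1, hb2, _⟩ := (mem_sDivs num 1 b (le_refl _)).mp hb
      show b < a
      nlinarith
  have hnodup2 : (descDivs num (num - 1)).Pairwise (· > ·) := pairwise_descDivs num (num - 1)
  have hmem : ∀ x, x ∈ lDivs num 1 ++ (sDivs num 1).reverse ↔ x ∈ descDivs num (num - 1) := by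
    intro x
    rw [List.mem_append, List.mem_reverse, mem_lDivs_one num x h2,
        mem_sDivs num 1 x (le_refl _), mem_descDivs]
    constructor
    · rintro (⟨h1, h3, _, h5⟩ | ⟨h1, hxx, h5⟩)
      · exact ⟨h1, by omega, h5⟩
      · refine ⟨h1, ?_, h5⟩
        rcases lt_or_ge x 2 with hx | hx
        · omega
        · nlinarith
    · rintro ⟨h1, h3, h5⟩
      rcases lt_or_ge num (x * x) with hx | hx
      · exact Or.inl ⟨h1, by omega, hx, h5⟩
      · exact Or.inr ⟨h1, hx, h5⟩
  have hperm : (lDivs num 1 ++ (sDivs num 1).reverse).Perm (descDivs num (num - 1)) :=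
    (List.perm_ext_iff_of_nodup hnodup1.nodup hnodup2.nodup).mpr hmem
  exact hperm.eq_of_pairwise (le := fun a b => a ≥ b)
    (fun a b _ _ h1 h1' => by omega)
    (hnodup1.imp (fun h => le_of_lt h)) (hnodup2.imp (fun h => le_of_lt h))

-- the tail of A's joined string after its first element
def joinTail : List Int → String
  | [] => ""
  | d :: ds => " + " ++ PySem.Int.toStr d ++ joinTail ds

lemma toStr_ne_empty (n : Int) : PySem.Int.toStr n ≠ "" := by
  intro h
  have h1 : PySem.Int.toChars n ≠ [] := by
    unfold PySem.Int.toChars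
    split
    · simp
    · have := @Nat.length_toDigits_pos 10 n.toNat
      intro hc
      rw [hc] at this
      simp at this
  apply h1
  rw [← PySem.Int.toList_toStr, h]
  rfl

lemma str_append_ne_empty_left (s t : String) (h : s ≠ "") : s ++ t ≠ "" := by
  intro he
  apply h
  have := congrArg String.toList he
  rw [String.toList_append] at this
  rcases List.append_eq_nil_iff.mp this with ⟨h1, _⟩
  exact String.toList_eq_nil_iff.mp h1

lemma combine_append (L : List Int) : ∀ (r : String), r ≠ "" →
    combineDivs r L = r ++ joinTail L := by
  induction L with
  | nil =>
      intro r _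
      rw [combineDivs, joinTail, String.append_empty]
  | cons d ds ih =>
      intro r hr
      rw [combineDivs, if_neg (by simpa using hr)]
      rw [ih _ (str_append_ne_empty_left _ _ (str_append_ne_empty_left _ _ hr))]
      rw [joinTail]
      simp [String.append_assoc]

lemma str_join_cons_cons (sep a b : String) (rest : List String) :
    PySem.Str.join sep (a :: b :: rest) = a ++ sep ++ PySem.Str.join sep (b :: rest) := by
  unfold PySem.Str.join
  rw [List.map_cons, List.map_cons, PySem.Chars.join_cons_cons]
  rw [String.ofList_append, String.ofList_append, String.ofList_toList, String.ofList_toList]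

lemma join_eq_joinTail (ds : List Int) : ∀ (d : Int),
    PySem.Str.join " + " ((d :: ds).map PySem.Int.toStr) = PySem.Int.toStr d ++ joinTail ds := by
  induction ds with
  | nil =>
      intro d
      rw [List.map_cons, List.map_nil, joinTail, String.append_empty]
      unfold PySem.Str.join
      rw [List.map_cons, List.map_nil, PySem.Chars.join_singleton]
      exact String.ofList_toList
  | cons e rest ih =>
      intro d
      rw [List.map_cons, List.map_cons, str_join_cons_cons]
      rw [show (PySem.Int.toStr e :: List.map PySem.Int.toStr rest)
            = (e :: rest).map PySem.Int.toStr from rfl, ih e]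
      rw [joinTail]
      simp [String.append_assoc]

lemma join_eq_combine (L : List Int) :
    PySem.Str.join " + " (L.map PySem.Int.toStr) = combineDivs "" L := by
  cases L with
  | nil => rfl
  | cons d ds =>
      rw [join_eq_joinTail ds d]
      rw [combineDivs, if_pos (show (("" == "") = true) from rfl)]
      rw [combine_append ds (PySem.Int.toStr d) (toStr_ne_empty d)]

-- ===== VERDICT (by name: the statement is the Claim_ definition above) =====
theorem numero_perfeito_spec : Claim_equal_numero_perfeito := by
  intro num _
  unfold Spec_numero_perfeito
  by_cases h : num ≤ 1
  · unfold numero_perfeito numero_perfeito_alt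
    rw [numero_perfeito_loop, dif_neg (by omega), if_pos h]
  · have h2 : 2 ≤ num := by omega
    rw [numero_perfeito_eq num h2]
    unfold numero_perfeito_alt
    rw [if_neg h]
    simp only [bLoop_eq num 1 [] [] (le_refl 1), List.nil_append, divs_eq num h2,
      join_eq_combine]
    rfl
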